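-- pv_equiv track=rewrite | github.com/iposov/algorithms-and-data-structures-spring-2022 | binary-search-for-the-answer/binary-search-for-the-answer.py | check_if_enough
-- ===== SOURCE A (Python) =====
-- def check_if_enough(A, k, length):
--     cur_cor = -1
--     for n in range(k):
--         cur_cor = A[next(i for i, x in enumerate(A) if x >= cur_cor)]
--         cur_cor = cur_cor + length
--         if cur_cor >= A[-1]:
--             return True
--     return False
-- ===== SOURCE B (Python) =====
-- def check_if_enough(A, k, length):
--     # prefix maxima of A: pref is non-decreasing, so the first index with
--     # A[i] >= cur can be found by binary search on pref
--     pref = []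
--     m = None
--     for x in A:
--         if m is None or x > m:
--             m = x
--         pref.append(m)
--     cur = -1
--     for _ in range(k):
--         lo, hi = 0, len(pref)
--         while lo < hi:
--             mid = (lo + hi) // 2
--             if pref[mid] < cur:
--                 lo = mid + 1
--             else:
--                 hi = mid
--         cur = pref[lo] + length
--         if cur >= A[-1]:
--             return True
--     return False
-- ===== Notes on version B (the rewrite author's own statement) =====
-- stated objective: faster
-- what changed: B builds the prefix-maximum array once and replaces A's per-jump linear scan (next over enumerate) by a binary search on that non-decreasing array, so each of the k jumps costs O(log n) instead of O(n).
import Mathlib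
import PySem

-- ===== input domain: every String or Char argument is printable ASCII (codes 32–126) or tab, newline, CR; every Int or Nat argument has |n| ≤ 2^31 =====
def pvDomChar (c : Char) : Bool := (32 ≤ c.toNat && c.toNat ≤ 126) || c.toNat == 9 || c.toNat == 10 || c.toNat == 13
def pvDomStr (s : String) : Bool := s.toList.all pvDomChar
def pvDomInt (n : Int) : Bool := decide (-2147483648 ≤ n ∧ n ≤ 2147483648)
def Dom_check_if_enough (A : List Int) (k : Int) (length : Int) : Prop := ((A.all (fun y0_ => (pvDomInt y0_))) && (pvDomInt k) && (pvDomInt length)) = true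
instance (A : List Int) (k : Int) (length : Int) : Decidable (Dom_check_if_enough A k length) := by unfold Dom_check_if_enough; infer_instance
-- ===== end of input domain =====

-- B replaces A's per-jump linear scan by a binary search over the prefix-maximum array (objective: faster; measured).
-- ===== PORT A =====
-- A's loop over range(k) with early return; A[next(i for i,x in enumerate(A) if x >= cur)]
-- is the first element of A that is >= cur (ported as List.find?; StopIteration/IndexError -> none, excluded by Pre_).
def goA (A : List Int) (length : Int) : Nat → Int → Bool
  | 0, _ => false
  | n + 1, cur =>
    match A.find? (fun x => decide (cur ≤ x)) with
    | none => false   -- Python raises StopIteration here; outside Pre_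
    | some v =>
      let cur' := v + length
      match PySem.List.pyGet? A (-1) with
      | none => false -- IndexError (A empty); outside Pre_
      | some last => if cur' ≥ last then true else goA A length n cur'

-- 'for n in range(k)' = k.toNat iterations (none when k ≤ 0), counted down structurally
def check_if_enough (A : List Int) (k : Int) (length : Int) : Bool :=
  goA A length k.toNat (-1)

-- ===== PORT B =====
-- B: prefix-maximum array + hand-written binary search (lower bound) per jump.
def prefB : List Int → Option Int → List Int
  | [], _ => []
  | x :: xs, m =>
    let m' := match m with
      | none => x
      | some mv => if x > mv then x else mv
    m' :: prefB xs (some m')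

def bsearch (pref : List Int) (cur : Int) (lo hi : Nat) : Nat :=
  if lo < hi then
    if pref.getD ((lo + hi) / 2) 0 < cur then bsearch pref cur ((lo + hi) / 2 + 1) hi
    else bsearch pref cur lo ((lo + hi) / 2)
  else lo
termination_by hi - lo
decreasing_by all_goals omega

def goB (A pref : List Int) (length : Int) : Nat → Int → Bool
  | 0, _ => false
  | n + 1, cur =>
    match PySem.List.pyGet? pref ((bsearch pref cur 0 pref.length : Nat) : Int) with
    | none => false  -- IndexError pref[lo]; outside Pre_
    | some v =>
      let cur' := v + length
      match PySem.List.pyGet? A (-1) with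
      | none => false
      | some last => if cur' ≥ last then true else goB A pref length n cur'

def check_if_enough_alt (A : List Int) (k : Int) (length : Int) : Bool :=
  goB A (prefB A none) length k.toNat (-1)

-- ===== PRECONDITION & SPEC =====
-- Pre_ excludes exactly the inputs where A raises (StopIteration/IndexError): k >= 1 with
-- A empty or every element of A below -1; B raises (IndexError) there too.
def Pre_check_if_enough (A : List Int) (k : Int) (length : Int) : Prop :=
  k ≤ 0 ∨ ∃ x ∈ A, -1 ≤ x
instance (A : List Int) (k : Int) (length : Int) : Decidable (Pre_check_if_enough A k length) := by
  unfold Pre_check_if_enough; infer_instance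
def pvWitness_check_if_enough : List Int × Int × Int := ([0, 3, 7], 2, 5)
def Spec_check_if_enough (A : List Int) (k : Int) (length : Int) (out : Bool) : Prop := out = check_if_enough_alt A k length
instance (A : List Int) (k : Int) (length : Int) (out : Bool) : Decidable (Spec_check_if_enough A k length out) := by unfold Spec_check_if_enough; infer_instance

-- ===== CLAIM (what is proved, stated in full; the proofs are below) =====
def Claim_equal_check_if_enough : Prop := ∀ (A : List Int) (k : Int) (length : Int), Dom_check_if_enough A k length → Pre_check_if_enough A k length → Spec_check_if_enough A k length (check_if_enough A k length)

-- ===== LEMMAS AND PROOFS =====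

-- prefB basics
theorem prefB_length (xs : List Int) (m : Option Int) : (prefB xs m).length = xs.length := by
  induction xs generalizing m with
  | nil => rfl
  | cons x xs ih => simp [prefB, ih]

theorem prefB_ge_self (xs : List Int) (m : Option Int) (i : Nat) (hi : i < xs.length) :
    xs.getD i 0 ≤ (prefB xs m).getD i 0 := by
  induction xs generalizing m i with
  | nil => simp at hi
  | cons x xs ih =>
    cases i with
    | zero =>
      simp only [prefB, List.getD]
      cases m with
      | none => simp
      | some mv => simp; split_ifs <;> omega
    | succ n => simpa [prefB] using ih (some _) n (by simpa using hi)

theorem prefB_ge_m (xs : List Int) (v : Int) (i : Nat) (hi : i < xs.length) :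
    v ≤ (prefB xs (some v)).getD i 0 := by
  induction xs generalizing v i with
  | nil => simp at hi
  | cons x xs ih =>
    cases i with
    | zero => simp [prefB]; split_ifs <;> omega
    | succ n =>
      have h1 : (if x > v then x else v) ≥ v := by split_ifs <;> omega
      have := ih (if x > v then x else v) n (by simpa using hi)
      simpa [prefB] using le_trans h1 this

theorem prefB_mono (xs : List Int) (m : Option Int) (i j : Nat) (hij : i ≤ j)
    (hj : j < xs.length) : (prefB xs m).getD i 0 ≤ (prefB xs m).getD j 0 := by
  induction xs generalizing m i j with
  | nil => simp at hj
  | cons x xs ih =>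
    cases i with
    | zero =>
      cases j with
      | zero => omega
      | succ n =>
        have := prefB_ge_m xs (match m with | none => x | some mv => if x > mv then x else mv)
          n (by simpa using hj)
        simpa [prefB] using this
    | succ n =>
      cases j with
      | zero => omega
      | succ p =>
        simpa [prefB] using ih _ n p (by omega) (by simpa using hj)

theorem prefB_lt (xs : List Int) (m : Option Int) (cur : Int) (i : Nat) (hi : i < xs.length)
    (hall : ∀ j, j ≤ i → xs.getD j 0 < cur) (hm : ∀ v, m = some v → v < cur) :
    (prefB xs m).getD i 0 < cur := by
  induction xs generalizing m i with
  | nil => simp at hi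
  | cons x xs ih =>
    have hx : x < cur := by simpa using hall 0 (by omega)
    rcases m with _ | mv
    · cases i with
      | zero => simpa [prefB] using hx
      | succ n =>
        have hrec := ih (some x) n (by simpa using hi)
          (fun j hj => by simpa using hall (j+1) (by omega))
          (fun v hv => by simp at hv; omega)
        simpa [prefB] using hrec
    · have hmv : mv < cur := hm mv rfl
      have hm' : (if x > mv then x else mv) < cur := by split_ifs <;> omega
      cases i with
      | zero => simpa [prefB] using hm'
      | succ n =>
        have hrec := ih (some (if x > mv then x else mv)) n (by simpa using hi)
          (fun j hj => by simpa using hall (j+1) (by omega))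
          (fun v hv => by simp at hv; omega)
        simpa [prefB] using hrec

theorem prefB_eq_self (xs : List Int) (m : Option Int) (cur : Int) (i : Nat) (hi : i < xs.length)
    (hbefore : ∀ j, j < i → xs.getD j 0 < cur) (hhit : cur ≤ xs.getD i 0)
    (hm : ∀ v, m = some v → v < cur) :
    (prefB xs m).getD i 0 = xs.getD i 0 := by
  induction xs generalizing m i with
  | nil => simp at hi
  | cons x xs ih =>
    rcases m with _ | mv
    · cases i with
      | zero => simp [prefB]
      | succ n =>
        have hx : x < cur := by simpa using hbefore 0 (by omega)
        have hrec := ih (some x) n (by simpa using hi)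
          (fun j hj => by simpa using hbefore (j+1) (by omega)) (by simpa using hhit)
          (fun v hv => by simp at hv; omega)
        simpa [prefB] using hrec
    · have hmv : mv < cur := hm mv rfl
      cases i with
      | zero =>
        have hx : cur ≤ x := by simpa using hhit
        simp only [prefB, List.getD, List.getElem?_cons_zero, Option.getD_some]
        split_ifs <;> omega
      | succ n =>
        have hx : x < cur := by simpa using hbefore 0 (by omega)
        have hm'lt : (if x > mv then x else mv) < cur := by split_ifs <;> omega
        have hrec := ih (some (if x > mv then x else mv)) n (by simpa using hi)
          (fun j hj => by simpa using hbefore (j+1) (by omega)) (by simpa using hhit)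
          (fun v hv => by simp at hv; omega)
        simpa [prefB] using hrec

-- binary-search correctness on a list monotone under getD
theorem bsearch_spec (pref : List Int) (cur : Int)
    (mono : ∀ i j, i ≤ j → j < pref.length → pref.getD i 0 ≤ pref.getD j 0) :
    ∀ (lo hi : Nat), lo ≤ hi → hi ≤ pref.length →
    lo ≤ bsearch pref cur lo hi ∧ bsearch pref cur lo hi ≤ hi ∧
    (∀ j, lo ≤ j → j < bsearch pref cur lo hi → pref.getD j 0 < cur) ∧
    (bsearch pref cur lo hi < hi → cur ≤ pref.getD (bsearch pref cur lo hi) 0) := by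
  intro lo hi
  generalize hd : hi - lo = d
  induction d using Nat.strong_induction_on generalizing lo hi with
  | _ d ih =>
    intro hle hlen
    by_cases h : lo < hi
    · have hmid1 : lo ≤ (lo + hi) / 2 := by omega
      have hmid2 : (lo + hi) / 2 < hi := by omega
      by_cases hc : pref.getD ((lo + hi) / 2) 0 < cur
      · have hrec := ih (hi - ((lo + hi) / 2 + 1)) (by omega) ((lo + hi) / 2 + 1) hi rfl
          (by omega) hlen
        rw [bsearch, if_pos h, if_pos hc]
        refine ⟨by omega, hrec.2.1, ?_, hrec.2.2.2⟩
        intro j hj1 hj2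
        by_cases hj3 : j ≤ (lo + hi) / 2
        · exact lt_of_le_of_lt (mono j ((lo + hi) / 2) hj3 (by omega)) hc
        · exact hrec.2.2.1 j (by omega) hj2
      · have hrec := ih ((lo + hi) / 2 - lo) (by omega) lo ((lo + hi) / 2) rfl
          (by omega) (by omega)
        rw [bsearch, if_pos h, if_neg hc]
        refine ⟨hrec.1, by omega, hrec.2.2.1, ?_⟩
        intro _
        by_cases hr : bsearch pref cur lo ((lo + hi) / 2) < (lo + hi) / 2
        · exact hrec.2.2.2 hr
        · have : bsearch pref cur lo ((lo + hi) / 2) = (lo + hi) / 2 := by omega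
          rw [this]; omega
    · rw [bsearch, if_neg h]
      exact ⟨le_refl _, by omega, by omega, by omega⟩

-- A's scan and B's binary search find the same value
theorem step_eq (xs : List Int) (cur : Int) (hx : ∃ x ∈ xs, cur ≤ x) :
    PySem.List.pyGet? (prefB xs none)
      ((bsearch (prefB xs none) cur 0 (prefB xs none).length : Nat) : Int)
      = xs.find? (fun x => decide (cur ≤ x)) := by
  classical
  set pref := prefB xs none with hpref
  have hlen : pref.length = xs.length := prefB_length xs none
  set n0 := xs.findIdx (fun x => decide (cur ≤ x)) with hn0
  have hxex : ∃ x ∈ xs, (fun x => decide (cur ≤ x)) x = true := by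
    obtain ⟨x, hx1, hx2⟩ := hx; exact ⟨x, hx1, by simpa using hx2⟩
  have hn0lt : n0 < xs.length := List.findIdx_lt_length_of_exists hxex
  have hbefore : ∀ j, j < n0 → xs.getD j 0 < cur := by
    intro j hj
    have := List.not_of_lt_findIdx (p := fun x => decide (cur ≤ x)) (xs := xs) hj
    rw [List.getD_eq_getElem _ _ (by omega)]
    simpa using this
  have hhit : cur ≤ xs.getD n0 0 := by
    have := List.findIdx_getElem (w := hn0lt) (p := fun x => decide (cur ≤ x)) (xs := xs)
    rw [List.getD_eq_getElem _ _ hn0lt]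
    simpa using this
  set r := bsearch pref cur 0 pref.length with hr
  have hspec := bsearch_spec pref cur (fun i j hij hj => prefB_mono xs none i j hij (by omega))
    0 pref.length (by omega) (le_refl _)
  rw [← hr] at hspec
  have hrlen : r ≤ pref.length := hspec.2.1
  have h1 : r ≤ n0 := by
    by_contra hcon
    have := hspec.2.2.1 n0 (by omega) (by omega)
    have h2 := prefB_ge_self xs none n0 hn0lt
    rw [← hpref] at h2
    omega
  have h2 : ¬ r < n0 := by
    intro hcon
    have hc := hspec.2.2.2 (by omega)
    have := prefB_lt xs none cur r (by omega)
      (fun j hj => hbefore j (by omega)) (by simp)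
    rw [← hpref] at this
    omega
  have hrn : r = n0 := by omega
  have heq : pref.getD r 0 = xs.getD n0 0 := by
    rw [hrn]
    exact prefB_eq_self xs none cur n0 hn0lt hbefore hhit (by simp)
  rw [List.find?_eq_getElem?_findIdx, ← hn0, PySem.List.pyGet?_natCast,
    List.getElem?_eq_getElem (by omega : r < pref.length),
    List.getElem?_eq_getElem hn0lt]
  congr 1
  rw [← List.getD_eq_getElem pref _ (by omega), ← List.getD_eq_getElem xs _ hn0lt]
  exact heq

-- the two loops agree while some element ≥ cur remains
theorem loop_eq (A : List Int) (L : Int) :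
    ∀ (n : Nat) (cur : Int), (∃ x ∈ A, cur ≤ x) →
    goA A L n cur = goB A (prefB A none) L n cur := by
  intro n
  induction n with
  | zero => intro cur _; rfl
  | succ n ih =>
    intro cur hx
    have hstep := step_eq A cur hx
    obtain ⟨x, hx1, hx2⟩ := hx
    have hsome : (A.find? (fun x => decide (cur ≤ x))).isSome :=
      List.find?_isSome.mpr ⟨x, hx1, by simpa using hx2⟩
    obtain ⟨v, hv⟩ := Option.isSome_iff_exists.mp hsome
    have hA : A ≠ [] := by intro h; subst h; simp at hx1
    have hl : PySem.List.pyGet? A (-1) = some (A.getLast hA) := by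
      rw [PySem.List.pyGet?_neg_one, List.getLast?_eq_some_getLast]
    simp only [goA, goB, hv, hstep, hl]
    by_cases hge : v + L ≥ A.getLast hA
    · simp [hge]
    · simp only [if_neg hge]
      exact ih (v + L) ⟨A.getLast hA, List.getLast_mem hA, by omega⟩

-- ===== VERDICT (by name: the statement is the Claim_ definition above) =====
theorem check_if_enough_spec : Claim_equal_check_if_enough := by
  intro A k L _hdom hpre
  unfold Spec_check_if_enough check_if_enough check_if_enough_alt
  rcases hpre with hk | hx
  · have : k.toNat = 0 := by omega
    rw [this]; rfl
  · exact loop_eq A L k.toNat (-1) hx
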